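-- pv_equiv track=rewrite | github.com/parthraghav/Pronoun-Pro | server/analyze.py | get_sentence_at_index
-- ===== SOURCE A (Python) =====
-- def get_sentence_at_index(index, resolved_list):
--     """Returns the sentence beginning at the index
--     """
--     end_of_sentence_punctuation = ['.', '!', '?']
--     begin_index = index
--     end_index = index
--     while begin_index >= 0:
--         val = resolved_list[begin_index].strip()
--         if val in end_of_sentence_punctuation:
--             break
--         else:
--             begin_index -= 1
--     while end_index <= len(resolved_list) - 1:
--         val = resolved_list[end_index].strip()
--         if val in end_of_sentence_punctuation:
--             break
--         else:
--             end_index += 1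
--     return resolved_list[begin_index + 1:end_index + 1], begin_index + 1
-- ===== SOURCE B (Python) =====
-- def get_sentence_at_index(index, resolved_list):
--     """Returns the sentence beginning at the index
--     (single forward pass: keep the last sentence-ending punctuation position
--     at or before index and the first one at or after index)"""
--     if index < 0 or index >= len(resolved_list):
--         raise IndexError('list index out of range')
--     punct = ('.', '!', '?')
--     n = len(resolved_list)
--     begin, end = -1, n
--     for i, w in enumerate(resolved_list):
--         if w.strip() in punct:
--             if i <= index:
--                 begin = i
--             if index <= i and end == n:
--                 end = i
--     return resolved_list[begin + 1:end + 1], begin + 1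
-- ===== Notes on version B (the rewrite author's own statement) =====
-- stated objective: alternative
-- what changed: Replaces A's two outward scans from index (down for the sentence start, up for the end) by index validation plus a single forward pass over the whole list that records the last punctuation position <= index and the first punctuation position >= index.
-- outside the precondition, e.g. on get_sentence_at_index(-2, ['a', '.', 'b', 'c']): A returns ([], -1), B raises IndexError
import Mathlib
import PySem

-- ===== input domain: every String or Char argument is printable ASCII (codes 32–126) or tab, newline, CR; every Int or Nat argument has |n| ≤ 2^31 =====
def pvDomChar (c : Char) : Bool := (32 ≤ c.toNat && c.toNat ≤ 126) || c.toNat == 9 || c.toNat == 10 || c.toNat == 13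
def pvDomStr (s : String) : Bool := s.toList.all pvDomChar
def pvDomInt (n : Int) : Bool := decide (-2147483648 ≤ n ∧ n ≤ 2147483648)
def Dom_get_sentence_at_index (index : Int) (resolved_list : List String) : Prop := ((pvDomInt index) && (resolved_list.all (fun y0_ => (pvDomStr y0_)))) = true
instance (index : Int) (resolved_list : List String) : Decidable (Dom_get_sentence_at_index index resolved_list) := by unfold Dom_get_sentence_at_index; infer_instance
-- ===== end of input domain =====

-- B replaces A's two outward scans from `index` by a single forward pass recording the
-- last sentence-ending punctuation at or before `index` and the first one at or after it
-- (alternative decomposition, same asymptotic cost).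


-- ===== PORT A =====
-- val.strip() in ['.', '!', '?']
def pvStripIsPunct (s : String) : Bool :=
  let v := PySem.Str.strip s
  v == "." || v == "!" || v == "?"

-- 'while begin_index >= 0: … begin_index -= 1'; none = IndexError
def pvBeginLoop (lst : List String) (b : Int) : Option Int :=
  if b < 0 then some b
  else
    match PySem.List.pyGet? lst b with
    | none => none
    | some s => if pvStripIsPunct s then some b else pvBeginLoop lst (b - 1)
termination_by (b + 1).toNat
decreasing_by omega

-- 'while end_index <= len(resolved_list) - 1: … end_index += 1'; none = IndexError
def pvEndLoop (lst : List String) (e : Int) : Option Int :=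
  if e ≤ (lst.length : Int) - 1 then
    match PySem.List.pyGet? lst e with
    | none => none
    | some s => if pvStripIsPunct s then some e else pvEndLoop lst (e + 1)
  else some e
termination_by ((lst.length : Int) - e).toNat
decreasing_by omega

def get_sentence_at_index (index : Int) (resolved_list : List String) : List String × Int :=
  match pvBeginLoop resolved_list index with
  | none => ([], 0)   -- Python raised IndexError here (outside Pre_)
  | some b =>
    match pvEndLoop resolved_list index with
    | none => ([], 0) -- Python raised IndexError here (outside Pre_)
    | some e => (PySem.List.slice resolved_list (some (b + 1)) (some (e + 1)), b + 1)

-- ===== PORT B =====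
-- loop body of Source B's single forward pass over enumerate(resolved_list)
def pvStep (index n : Int) (acc : Int × Int) (iw : Int × String) : Int × Int :=
  if pvStripIsPunct iw.2 then
    ((if iw.1 ≤ index then iw.1 else acc.1),
     (if index ≤ iw.1 && acc.2 == n then iw.1 else acc.2))
  else acc

def get_sentence_at_index_alt (index : Int) (resolved_list : List String) : List String × Int :=
  if index < 0 ∨ (resolved_list.length : Int) ≤ index then ([], 0) -- Python raises IndexError here (outside Pre_)
  else
  let n : Int := resolved_list.length
  let be := (PySem.List.enumerate resolved_list 0).foldl (pvStep index n) (-1, n)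
  (PySem.List.slice resolved_list (some (be.1 + 1)) (some (be.2 + 1)), be.1 + 1)

-- ===== PRECONDITION & SPEC =====
-- Pre_ keeps the natural domain 0 ≤ index < len: A raises IndexError for index ≥ len and
-- for index < -len, and on the remaining negative indices A's value mixes a skipped
-- begin-scan with a wrapped-around end-scan — an artefact of Python negative indexing
-- that neither a caller nor B would want to specify; B raises IndexError on all of them.
def Pre_get_sentence_at_index (index : Int) (resolved_list : List String) : Prop :=
  0 ≤ index ∧ index < resolved_list.length
instance (index : Int) (resolved_list : List String) : Decidable (Pre_get_sentence_at_index index resolved_list) := by unfold Pre_get_sentence_at_index; infer_instance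

def pvWitness_get_sentence_at_index : Int × List String := (1, ["hi", "."])

def Spec_get_sentence_at_index (index : Int) (resolved_list : List String) (out : List String × Int) : Prop := out = get_sentence_at_index_alt index resolved_list
instance (index : Int) (resolved_list : List String) (out : List String × Int) : Decidable (Spec_get_sentence_at_index index resolved_list out) := by unfold Spec_get_sentence_at_index; infer_instance

-- ===== CLAIM (what is proved, stated in full; the proofs are below) =====
def Claim_equal_get_sentence_at_index : Prop := ∀ (index : Int) (resolved_list : List String), Dom_get_sentence_at_index index resolved_list → Pre_get_sentence_at_index index resolved_list → Spec_get_sentence_at_index index resolved_list (get_sentence_at_index index resolved_list)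
-- ===== LEMMAS AND PROOFS =====

-- 'position j of lst strips to sentence-ending punctuation' (proof-side predicate)
def pvP (lst : List String) (j : Int) : Bool := pvStripIsPunct (lst.getD j.toNat "")

lemma pvGet_some (lst : List String) (b : Int) (h0 : 0 ≤ b) (h1 : b < lst.length) :
    PySem.List.pyGet? lst b = some (lst.getD b.toNat "") := by
  have hb : b = ((b.toNat : Nat) : Int) := by omega
  rw [hb, PySem.List.pyGet?_natCast]
  rw [List.getD_eq_getElem?_getD]
  simp only [Int.toNat_natCast]
  rw [List.getElem?_eq_getElem (by omega)]; rfl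

-- characterization of A's downward scan: it returns the greatest punctuation
-- position ≤ b, or -1 if there is none
lemma pvBeginLoop_char (lst : List String) :
    ∀ (k : Nat) (b : Int), (b + 1).toNat = k → -1 ≤ b → b < lst.length →
    ∃ v, pvBeginLoop lst b = some v ∧ -1 ≤ v ∧ v ≤ b ∧
      (v = -1 ∨ (0 ≤ v ∧ pvP lst v = true)) ∧
      (∀ j : Int, 0 ≤ j → v < j → j ≤ b → pvP lst j = false) := by
  intro k
  induction k with
  | zero =>
    intro b hk h0 h1
    have hb : b = -1 := by omega
    subst hb
    refine ⟨-1, ?_, by omega, by omega, Or.inl rfl, by intro j h1 h2 h3; omega⟩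
    rw [pvBeginLoop]; simp
  | succ k ih =>
    intro b hk h0 h1
    have hb0 : 0 ≤ b := by omega
    rw [pvBeginLoop]
    rw [if_neg (by omega), pvGet_some lst b hb0 h1]
    by_cases hp : pvStripIsPunct (lst.getD b.toNat "") = true
    · simp only [hp, if_true]
      exact ⟨b, rfl, by omega, by omega, Or.inr ⟨hb0, hp⟩,
        by intro j hj1 hj2 hj3; omega⟩
    · simp only [hp]
      obtain ⟨v, hv, h2, h3, h4, h5⟩ := ih (b - 1) (by omega) (by omega) (by omega)
      refine ⟨v, hv, by omega, by omega, h4, ?_⟩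
      intro j hj1 hj2 hj3
      by_cases hje : j = b
      · subst hje; unfold pvP; simpa using hp
      · exact h5 j hj1 hj2 (by omega)

-- characterization of A's upward scan: it returns the least punctuation
-- position ≥ e, or len if there is none
lemma pvEndLoop_char (lst : List String) :
    ∀ (k : Nat) (e : Int), ((lst.length : Int) - e).toNat = k → 0 ≤ e → e ≤ lst.length →
    ∃ v, pvEndLoop lst e = some v ∧ e ≤ v ∧ v ≤ lst.length ∧
      (v = lst.length ∨ (v < lst.length ∧ pvP lst v = true)) ∧
      (∀ j : Int, e ≤ j → j < v → pvP lst j = false) := by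
  intro k
  induction k with
  | zero =>
    intro e hk h0 h1
    have he : e = lst.length := by omega
    subst he
    refine ⟨(lst.length : Int), ?_, by omega, by omega, Or.inl rfl,
      by intro j hj1 hj2; omega⟩
    rw [pvEndLoop]; rw [if_neg (by omega)]
  | succ k ih =>
    intro e hk h0 h1
    have he1 : e < lst.length := by omega
    rw [pvEndLoop, if_pos (by omega), pvGet_some lst e h0 he1]
    by_cases hp : pvStripIsPunct (lst.getD e.toNat "") = true
    · simp only [hp, if_true]
      exact ⟨e, rfl, by omega, by omega, Or.inr ⟨he1, hp⟩, by intro j hj1 hj2; omega⟩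
    · simp only [hp]
      obtain ⟨v, hv, h2, h3, h4, h5⟩ := ih (e + 1) (by omega) (by omega) (by omega)
      refine ⟨v, hv, by omega, h3, h4, ?_⟩
      intro j hj1 hj2
      by_cases hje : j = e
      · subst hje; unfold pvP; simpa using hp
      · exact h5 j (by omega) hj2

lemma pvEnum_mem (lst : List String) :
    ∀ (s : Int) (p : Int × String), p ∈ PySem.List.enumerate lst s →
      s ≤ p.1 ∧ p.1 < s + lst.length ∧ p.2 = lst.getD (p.1 - s).toNat "" := by
  induction lst with
  | nil => intro s p hp; simp [PySem.List.enumerate_nil] at hp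
  | cons x xs ih =>
    intro s p hp
    rw [PySem.List.enumerate_cons] at hp
    rcases List.mem_cons.mp hp with h | h
    · subst h; simp
    · obtain ⟨h1, h2, h3⟩ := ih (s + 1) p h
      refine ⟨by omega, by simp; omega, ?_⟩
      rw [h3]
      have : (p.1 - s).toNat = (p.1 - (s + 1)).toNat + 1 := by omega
      rw [this]; simp

-- invariant of B's forward pass: after the elements with positions [s, s+|rest|),
-- b is the greatest punctuation position ≤ index seen so far (else -1) and
-- e the least punctuation position ≥ index seen so far (else n)
lemma pvFold_char (index n : Int) (P : Int → Bool) (h0 : 0 ≤ index) :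
    ∀ (rest : List String) (s b e : Int),
      (∀ p ∈ PySem.List.enumerate rest s, pvStripIsPunct p.2 = P p.1) →
      0 ≤ s → s + rest.length ≤ n →
      (b = -1 ∨ (0 ≤ b ∧ b ≤ index ∧ b < s ∧ P b = true)) →
      (∀ j : Int, 0 ≤ j → b < j → j < s → j ≤ index → P j = false) →
      (e = n ∨ (index ≤ e ∧ e < s ∧ P e = true)) →
      (∀ j : Int, index ≤ j → j < s → j < e → P j = false) →
      ∃ b' e', (PySem.List.enumerate rest s).foldl (pvStep index n) (b, e) = (b', e') ∧
        (b' = -1 ∨ (0 ≤ b' ∧ b' ≤ index ∧ b' < s + rest.length ∧ P b' = true)) ∧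
        (∀ j : Int, 0 ≤ j → b' < j → j < s + rest.length → j ≤ index → P j = false) ∧
        (e' = n ∨ (index ≤ e' ∧ e' < s + rest.length ∧ P e' = true)) ∧
        (∀ j : Int, index ≤ j → j < s + rest.length → j < e' → P j = false) := by
  intro rest
  induction rest with
  | nil =>
    intro s b e _ _ _ hB1 hB2 hE1 hE2
    exact ⟨b, e, by simp [PySem.List.enumerate_nil], by simpa using hB1,
      by simpa using hB2, by simpa using hE1, by simpa using hE2⟩
  | cons w ws ih =>
    intro s b e hP hs0 hsn hB1 hB2 hE1 hE2
    rw [PySem.List.enumerate_cons, List.foldl_cons,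
      show s + ((w :: ws).length : Int) = (s + 1) + (ws.length : Int) by simp; ring]
    have hB1' : b = -1 ∨ (0 ≤ b ∧ b ≤ index ∧ b < s + 1 ∧ P b = true) := by
      rcases hB1 with h | h
      · exact Or.inl h
      · exact Or.inr ⟨h.1, h.2.1, by omega, h.2.2.2⟩
    have hPs : pvStripIsPunct w = P s := hP (s, w) (by rw [PySem.List.enumerate_cons]; simp)
    have hP' : ∀ p ∈ PySem.List.enumerate ws (s + 1), pvStripIsPunct p.2 = P p.1 := by
      intro p hp; exact hP p (by rw [PySem.List.enumerate_cons]; simp [hp])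
    have hlen : s + 1 + (ws.length : Int) ≤ n := by simp at hsn; omega
    -- compute the step
    by_cases hps : P s = true
    · have hstep : pvStep index n (b, e) (s, w) =
        ((if s ≤ index then s else b), (if index ≤ s && e == n then s else e)) := by
        unfold pvStep; rw [hPs, hps]; simp
      rw [hstep]
      by_cases hsi : s ≤ index
      · rw [if_pos hsi]
        by_cases hie : index ≤ s ∧ e = n
        · have : (index ≤ s && e == n) = true := by simp [hie.1, hie.2]
          rw [if_pos this]
          refine ih (s + 1) s s ?_ (by omega) hlen ?_ ?_ ?_ ?_
          · exact hP'
          · exact Or.inr ⟨by omega, hsi, by omega, hps⟩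
          · intro j hj1 hj2 hj3 hj4; omega
          · exact Or.inr ⟨by omega, by omega, hps⟩
          · intro j hj1 hj2 hj3; omega
        · have : (index ≤ s && e == n) = false := by
            by_cases h1 : index ≤ s
            · have : ¬ e = n := fun h => hie ⟨h1, h⟩
              simp [this]
            · simp [h1]
          rw [this, if_neg (by simp)]
          refine ih (s + 1) s e hP' (by omega) hlen
            (Or.inr ⟨by omega, hsi, by omega, hps⟩)
            (by intro j hj1 hj2 hj3 hj4; omega) ?_ ?_
          · rcases hE1 with h | h
            · -- e = n but the guard failed, so index > s; e stays n
              exact Or.inl h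
            · exact Or.inr ⟨h.1, by omega, h.2.2⟩
          · intro j hj1 hj2 hj3
            by_cases hjs : j = s
            · rcases hE1 with h | h
              · exact absurd ⟨by omega, h⟩ hie
              · omega
            · exact hE2 j hj1 (by omega) hj3
      · rw [if_neg hsi]
        by_cases hen : e = n
        · have : (index ≤ s && e == n) = true := by simp [hen]; omega
          rw [if_pos this]
          refine ih (s + 1) b s hP' (by omega) hlen hB1'
            (by intro j hj1 hj2 hj3 hj4; exact hB2 j hj1 hj2 (by omega) hj4)
            (Or.inr ⟨by omega, by omega, hps⟩) ?_
          intro j hj1 hj2 hj3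
          exact hE2 j hj1 (by omega) (by omega)
        · have : (index ≤ s && e == n) = false := by simp [hen]
          rw [this, if_neg (by simp)]
          refine ih (s + 1) b e hP' (by omega) hlen hB1'
            (by intro j hj1 hj2 hj3 hj4; exact hB2 j hj1 hj2 (by omega) hj4) ?_ ?_
          · rcases hE1 with h | h
            · exact absurd h hen
            · exact Or.inr ⟨h.1, by omega, h.2.2⟩
          · intro j hj1 hj2 hj3
            rcases hE1 with h | h
            · exact absurd h hen
            · exact hE2 j hj1 (by omega) hj3
    · have hps' : P s = false := by simpa using hps
      have hstep : pvStep index n (b, e) (s, w) = (b, e) := by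
        unfold pvStep; rw [hPs, hps']; simp
      rw [hstep]
      refine ih (s + 1) b e hP' (by omega) hlen hB1' ?_ ?_ ?_
      · intro j hj1 hj2 hj3 hj4
        by_cases hjs : j = s
        · subst hjs; exact hps'
        · exact hB2 j hj1 hj2 (by omega) hj4
      · rcases hE1 with h | h
        · exact Or.inl h
        · exact Or.inr ⟨h.1, by omega, h.2.2⟩
      · intro j hj1 hj2 hj3
        by_cases hjs : j = s
        · subst hjs; exact hps'
        · exact hE2 j hj1 (by omega) hj3

-- the two scans and the single pass select the same pair of bounds
lemma pvMain (index : Int) (lst : List String)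
    (h0 : 0 ≤ index) (h1 : index < lst.length) :
    get_sentence_at_index index lst = get_sentence_at_index_alt index lst := by
  obtain ⟨vA, hvA, hA1, hA2, hA3, hA4⟩ :=
    pvBeginLoop_char lst (index + 1).toNat index rfl (by omega) h1
  obtain ⟨uA, huA, hU1, hU2, hU3, hU4⟩ :=
    pvEndLoop_char lst ((lst.length : Int) - index).toNat index rfl h0 (by omega)
  have hP : ∀ p ∈ PySem.List.enumerate lst 0, pvStripIsPunct p.2 = pvP lst p.1 := by
    intro p hp
    obtain ⟨_, _, h3⟩ := pvEnum_mem lst 0 p hp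
    rw [h3]; unfold pvP; rw [sub_zero]
  obtain ⟨b', e', hfold, hB1, hB2, hE1, hE2⟩ :=
    pvFold_char index (lst.length : Int) (pvP lst) h0 lst 0 (-1) (lst.length : Int) hP
      (by omega) (by omega) (Or.inl rfl) (by intro j hj1 hj2 hj3 hj4; omega)
      (Or.inl rfl) (by intro j hj1 hj2 hj3; omega)
  rw [zero_add] at hB1 hB2 hE1 hE2
  have hbb : vA = b' := by
    rcases lt_trichotomy vA b' with h | h | h
    · rcases hB1 with hb | hb
      · omega
      · have := hA4 b' (by omega) h (by omega)
        rw [hb.2.2.2] at this; exact absurd this (by simp)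
    · exact h
    · have hva0 : 0 ≤ vA := by omega
      rcases hA3 with hv | hv
      · omega
      · have := hB2 vA hva0 h (by omega) (by omega)
        rw [hv.2] at this; exact absurd this (by simp)
  have hee : uA = e' := by
    rcases lt_trichotomy uA e' with h | h | h
    · have hun : uA < lst.length := by
        rcases hE1 with he | he <;> omega
      rcases hU3 with hu | hu
      · omega
      · have := hE2 uA (by omega) hun h
        rw [hu.2] at this; exact absurd this (by simp)
    · exact h
    · have hen : e' < lst.length := by omega
      rcases hE1 with he | he
      · omega
      · have := hU4 e' (by omega) h
        rw [he.2.2] at this; exact absurd this (by simp)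
  rw [get_sentence_at_index_alt, if_neg (by omega)]
  simp only [get_sentence_at_index, hvA, huA, hfold, hbb, hee]

-- ===== VERDICT (by name: the statement is the Claim_ definition above) =====
theorem get_sentence_at_index_spec : Claim_equal_get_sentence_at_index := by
  intro index lst _ hpre
  unfold Spec_get_sentence_at_index
  exact pvMain index lst hpre.1 hpre.2
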